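-- pv_equiv track=rewrite | github.com/Thustra/TorrentSearch | search.py | split_link_list
-- ===== SOURCE A (Python) =====
-- def split_link_list(linklist):
--     linklist1080p = []
--     linklist720p = []
--     linklistOther = []
--     for item in linklist:
--         if '1080p' in item[0]:
--             linklist1080p.append(item)
--         elif '720p' in item[0]:
--             linklist720p.append(item)
--         else:
--             linklistOther.append(item)
--
--     return (linklist1080p,linklist720p,linklistOther)
-- ===== SOURCE B (Python) =====
-- def split_link_list(linklist):
--     # Simpler decomposition: three independent comprehensions instead of one branching loop.
--     linklist1080p = [item for item in linklist if '1080p' in item[0]]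
--     linklist720p = [item for item in linklist if '720p' in item[0] and '1080p' not in item[0]]
--     linklistOther = [item for item in linklist if '1080p' not in item[0] and '720p' not in item[0]]
--     return (linklist1080p, linklist720p, linklistOther)
-- ===== Notes on version B (the rewrite author's own statement) =====
-- stated objective: simpler
-- what changed: Replaced the single stateful loop with three accumulators by three independent filter comprehensions, one per bucket, with guards mirroring the elif precedence.
import Mathlib
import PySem

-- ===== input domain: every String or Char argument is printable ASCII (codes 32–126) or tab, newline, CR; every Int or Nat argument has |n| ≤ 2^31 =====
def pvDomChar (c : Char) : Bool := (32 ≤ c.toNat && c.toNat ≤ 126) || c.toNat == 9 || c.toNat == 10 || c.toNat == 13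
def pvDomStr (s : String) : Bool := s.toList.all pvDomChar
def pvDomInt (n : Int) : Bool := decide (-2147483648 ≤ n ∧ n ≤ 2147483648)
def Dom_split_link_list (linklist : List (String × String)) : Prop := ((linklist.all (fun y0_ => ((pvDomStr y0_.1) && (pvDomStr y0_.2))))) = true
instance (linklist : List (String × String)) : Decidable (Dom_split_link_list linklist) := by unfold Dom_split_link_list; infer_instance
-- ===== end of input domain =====

-- B replaces A's single branching loop by three independent filter comprehensions (objective: simpler).

-- ===== PORT A =====
-- Literal port of A: one fold over linklist maintaining the three buckets, appending per branch.
def split_link_list (linklist : List (String × String)) : (List (String × String)) × (List (String × String)) × (List (String × String)) :=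
  let acc := linklist.foldl (fun (acc : (List (String × String)) × (List (String × String)) × (List (String × String))) item =>
    if PySem.Str.isIn "1080p" item.1 then (acc.1 ++ [item], acc.2.1, acc.2.2)
    else if PySem.Str.isIn "720p" item.1 then (acc.1, acc.2.1 ++ [item], acc.2.2)
    else (acc.1, acc.2.1, acc.2.2 ++ [item])) ([], [], [])
  acc

-- ===== PORT B =====
-- Port of B: three independent filters, one per bucket.
def split_link_list_alt (linklist : List (String × String)) : (List (String × String)) × (List (String × String)) × (List (String × String)) :=
  (linklist.filter (fun item => PySem.Str.isIn "1080p" item.1),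
   linklist.filter (fun item => PySem.Str.isIn "720p" item.1 && !(PySem.Str.isIn "1080p" item.1)),
   linklist.filter (fun item => !(PySem.Str.isIn "1080p" item.1) && !(PySem.Str.isIn "720p" item.1)))

-- ===== PRECONDITION & SPEC =====
def Spec_split_link_list (linklist : List (String × String)) (out : (List (String × String)) × (List (String × String)) × (List (String × String))) : Prop := out = split_link_list_alt linklist
instance (linklist : List (String × String)) (out : (List (String × String)) × (List (String × String)) × (List (String × String))) : Decidable (Spec_split_link_list linklist out) := by unfold Spec_split_link_list; infer_instance

-- ===== CLAIM (what is proved, stated in full; the proofs are below) =====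
def Claim_equal_split_link_list : Prop := ∀ (linklist : List (String × String)), Dom_split_link_list linklist → Spec_split_link_list linklist (split_link_list linklist)

-- ===== LEMMAS AND PROOFS =====

-- ===== VERDICT (by name: the statement is the Claim_ definition above) =====
-- Loop invariant: the fold starting from partial buckets yields those buckets extended by the filters.
theorem split_fold_inv (l : List (String × String)) (a b c : List (String × String)) :
    l.foldl (fun (acc : (List (String × String)) × (List (String × String)) × (List (String × String))) item =>
      if PySem.Str.isIn "1080p" item.1 then (acc.1 ++ [item], acc.2.1, acc.2.2)
      else if PySem.Str.isIn "720p" item.1 then (acc.1, acc.2.1 ++ [item], acc.2.2)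
      else (acc.1, acc.2.1, acc.2.2 ++ [item])) (a, b, c)
    = (a ++ l.filter (fun item => PySem.Str.isIn "1080p" item.1),
       b ++ l.filter (fun item => PySem.Str.isIn "720p" item.1 && !(PySem.Str.isIn "1080p" item.1)),
       c ++ l.filter (fun item => !(PySem.Str.isIn "1080p" item.1) && !(PySem.Str.isIn "720p" item.1))) := by
  induction l generalizing a b c with
  | nil => simp
  | cons x xs ih =>
    simp only [List.foldl_cons, List.filter_cons]
    by_cases h1 : PySem.Str.isIn "1080p" x.1 = true <;>
      by_cases h2 : PySem.Str.isIn "720p" x.1 = true <;>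
        · simp only [h1, h2, if_true, if_false, ite_true, ite_false, eq_self_iff_true,
            Bool.not_true, Bool.not_false, Bool.true_and, Bool.false_and, Bool.and_true,
            Bool.and_false, Bool.and_self, decide_true, decide_false]
          rw [ih]
          simp

theorem split_link_list_spec : Claim_equal_split_link_list := by
  intro l _
  unfold Spec_split_link_list split_link_list split_link_list_alt
  simpa using split_fold_inv l [] [] []
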